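-- pv_equiv track=rewrite | github.com/strayMat/agriphyto-schema | agriphyto_schema/data/parse_dicos.py | infer_type_from_varname
-- ===== SOURCE A (Python) =====
-- def infer_type_from_varname(var_name: str) -> str:
--     """Infer the Pandera type from the variable name.
--
--     Args:
--         var_name (str): The variable name.
--
--     Returns:
--         str: The inferred Pandera type.
--     """
--     pandera_type = "string"  # default
--     if any(
--         pattern in var_name.upper()
--         for pattern in [
--             "NB",
--             "COEF",
--             "SUPP",
--             "DIST",
--             "DENIT",
--             "REND",
--             "PRIX",
--             "AGE",
--             "DOSE",
--             "QTE",
--             "QDOSE",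
--         ]
--     ):
--         pandera_type = "float"
--     elif any(
--         pattern in var_name.upper()
--         for pattern in ["IDENT", "CODE", "SIRET", "AMM", "ANNEE", "AN"]
--     ):
--         pandera_type = "string"
--     return pandera_type
-- ===== SOURCE B (Python) =====
-- # Sliding-window scan: instead of testing each keyword against the whole name,
-- # walk the uppercased name once and test each window of length 2..5 for
-- # membership in the set of float keywords.  The string keywords of A's elif
-- # branch are dropped: their result equals the default "string".
-- FLOAT_PATTERNS = {
--     "NB", "COEF", "SUPP", "DIST", "DENIT", "REND",
--     "PRIX", "AGE", "DOSE", "QTE", "QDOSE",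
-- }
-- WINDOW_LENGTHS = (2, 3, 4, 5)
--
--
-- def infer_type_from_varname(var_name: str) -> str:
--     upper = var_name.upper()
--     for i in range(len(upper)):
--         for length in WINDOW_LENGTHS:
--             if upper[i:i + length] in FLOAT_PATTERNS:
--                 return "float"
--     return "string"
-- ===== Notes on version B (the rewrite author's own statement) =====
-- stated objective: alternative
-- what changed: Replaces the per-keyword substring scans and if/elif chain by a single sliding-window pass over the uppercased name, checking each window of length 2-5 for membership in a set of float keywords; the string-keyword branch is dropped since its result equals the default.
import Mathlib
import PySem

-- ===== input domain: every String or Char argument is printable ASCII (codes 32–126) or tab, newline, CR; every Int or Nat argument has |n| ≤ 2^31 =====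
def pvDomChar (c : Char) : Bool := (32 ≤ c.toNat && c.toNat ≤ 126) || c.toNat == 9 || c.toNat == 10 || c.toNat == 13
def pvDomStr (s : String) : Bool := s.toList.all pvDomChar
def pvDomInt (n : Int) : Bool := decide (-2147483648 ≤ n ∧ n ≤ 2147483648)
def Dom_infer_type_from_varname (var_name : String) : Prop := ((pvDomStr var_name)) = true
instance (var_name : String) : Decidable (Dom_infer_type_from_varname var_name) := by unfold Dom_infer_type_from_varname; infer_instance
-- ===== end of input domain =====

-- B replaces A's per-keyword substring scans and if/elif chain by one sliding-window pass
-- over the uppercased name, testing each window of length 2..5 for membership in the set of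
-- float keywords; the string-keyword branch is dropped since its result equals the default.

-- ===== PORT A =====
def infer_type_from_varname (var_name : String) : String :=
  let pandera_type := "string"  -- default
  if (["NB", "COEF", "SUPP", "DIST", "DENIT", "REND", "PRIX", "AGE", "DOSE",
       "QTE", "QDOSE"].any
      (fun pattern => PySem.Str.isIn pattern (PySem.Str.upper var_name))) then
    "float"
  else if (["IDENT", "CODE", "SIRET", "AMM", "ANNEE", "AN"].any
      (fun pattern => PySem.Str.isIn pattern (PySem.Str.upper var_name))) then
    "string"
  else
    pandera_type

-- ===== PORT B =====
def pvFloatPatterns : PySem.Set String :=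
  PySem.Set.ofList ["NB", "COEF", "SUPP", "DIST", "DENIT", "REND",
                    "PRIX", "AGE", "DOSE", "QTE", "QDOSE"]

def pvWindowLengths : List Int := [2, 3, 4, 5]

def infer_type_from_varname_alt (var_name : String) : String :=
  let upper := PySem.Str.upper var_name
  if (PySem.List.pyRange 0 (PySem.Str.len upper) 1).any (fun i =>
      pvWindowLengths.any (fun length =>
        PySem.Set.contains pvFloatPatterns
          (PySem.Str.slice upper (some i) (some (i + length))))) then
    "float"
  else
    "string"

-- ===== PRECONDITION & SPEC =====
def Spec_infer_type_from_varname (var_name : String) (out : String) : Prop := out = infer_type_from_varname_alt var_name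
instance (var_name : String) (out : String) : Decidable (Spec_infer_type_from_varname var_name out) := by unfold Spec_infer_type_from_varname; infer_instance

-- ===== CLAIM (what is proved, stated in full; the proofs are below) =====
def Claim_equal_infer_type_from_varname : Prop := ∀ (var_name : String), Dom_infer_type_from_varname var_name → Spec_infer_type_from_varname var_name (infer_type_from_varname var_name)

-- ===== LEMMAS AND PROOFS =====

-- If some window u[i:i+L] (0 ≤ i, 0 ≤ L) equals p, then p is a substring of u.
theorem pv_isIn_of_window (u p : String) (i L : Int) (h0 : 0 ≤ i) (hL : 0 ≤ L)
    (h : PySem.Str.slice u (some i) (some (i + L)) = p) :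
    PySem.Str.isIn p u = true := by
  rw [PySem.Str.isIn_iff_infix]
  have ht := congrArg String.toList h
  rw [PySem.Str.toList_slice, PySem.Chars.slice_eq_listSlice,
      PySem.List.slice_toNat _ h0 (by omega)] at ht
  exact List.infix_iff_prefix_suffix.mpr
    ⟨u.toList.drop i.toNat, by rw [← ht]; exact List.take_prefix _ _, List.drop_suffix _ _⟩

-- Conversely, a nonempty substring p of u is the window u[j:j+len(p)] for some valid j.
theorem pv_window_of_isIn (u p : String) (hp : p.toList ≠ [])
    (hin : PySem.Str.isIn p u = true) :
    ∃ i : Int, (0 ≤ i ∧ i < PySem.Str.len u) ∧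
      PySem.Str.slice u (some i) (some (i + (p.toList.length : Int))) = p := by
  have h2 : PySem.Chars.isIn p.toList u.toList = true :=
    (PySem.Chars.isIn_iff_infix _ _).mpr ((PySem.Str.isIn_iff_infix _ _).mp hin)
  obtain ⟨j, hj⟩ := (PySem.Chars.exists_prefix_drop_iff_isIn _ _).mpr h2
  have hjlt : j < u.toList.length := by
    by_contra hge
    push_neg at hge
    rw [List.drop_eq_nil_of_le hge] at hj
    exact hp (List.prefix_nil.mp hj)
  refine ⟨(j : Int), ⟨by positivity, by rw [PySem.Str.len_eq]; exact_mod_cast hjlt⟩, ?_⟩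
  apply String.toList_inj.mp
  rw [PySem.Str.toList_slice, PySem.Chars.slice_eq_listSlice, PySem.List.slice_natCast_add]
  exact (List.prefix_iff_eq_take.mp hj).symm

-- One float pattern p found in u yields a matching window of B's scan.
theorem pv_case (u p : String) (hp : p.toList ≠ [])
    (hlen : ((p.toList.length : Int)) ∈ pvWindowLengths) (hP : p ∈ pvFloatPatterns)
    (hin : PySem.Str.isIn p u = true) :
    ∃ i ∈ PySem.List.pyRange 0 (PySem.Str.len u) 1, ∃ L ∈ pvWindowLengths,
      PySem.Set.contains pvFloatPatterns (PySem.Str.slice u (some i) (some (i + L))) = true := by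
  obtain ⟨i, ⟨h0, hlt⟩, hsl⟩ := pv_window_of_isIn u p hp hin
  refine ⟨i, PySem.List.mem_pyRange_one.mpr ⟨h0, hlt⟩, _, hlen, ?_⟩
  rw [hsl]
  exact List.elem_eq_true_of_mem hP

-- The sliding-window condition of B equals the any-float-pattern condition of A.
theorem pv_cond_eq (u : String) :
    ((PySem.List.pyRange 0 (PySem.Str.len u) 1).any (fun i =>
        pvWindowLengths.any (fun length =>
          PySem.Set.contains pvFloatPatterns
            (PySem.Str.slice u (some i) (some (i + length)))))) =
    (["NB", "COEF", "SUPP", "DIST", "DENIT", "REND", "PRIX", "AGE", "DOSE",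
      "QTE", "QDOSE"].any (fun pattern => PySem.Str.isIn pattern u)) := by
  rw [Bool.eq_iff_iff]
  simp only [List.any_eq_true]
  constructor
  · rintro ⟨i, hi, L, hL, hc⟩
    obtain ⟨h0, -⟩ := PySem.List.mem_pyRange_one.mp hi
    have hLpos : 0 ≤ L := by
      have : L = 2 ∨ L = 3 ∨ L = 4 ∨ L = 5 := by simpa [pvWindowLengths] using hL
      omega
    have hmem : PySem.Str.slice u (some i) (some (i + L)) ∈
        (["NB", "COEF", "SUPP", "DIST", "DENIT", "REND", "PRIX", "AGE", "DOSE",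
          "QTE", "QDOSE"] : List String) := by
      have := List.mem_of_elem_eq_true hc
      rwa [pvFloatPatterns, PySem.Set.mem_ofList] at this
    exact ⟨_, hmem, pv_isIn_of_window u _ i L h0 hLpos rfl⟩
  · rintro ⟨p, hp, hin⟩
    fin_cases hp <;>
      exact pv_case u _ (by decide) (by decide) (by decide) hin

-- ===== VERDICT (by name: the statement is the Claim_ definition above) =====
theorem infer_type_from_varname_spec : Claim_equal_infer_type_from_varname := by
  intro var_name _
  unfold Spec_infer_type_from_varname infer_type_from_varname infer_type_from_varname_alt
  dsimp only
  rw [pv_cond_eq (PySem.Str.upper var_name)]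
  split_ifs <;> rfl
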